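-- pv_equiv track=rewrite | github.com/proboi-i/codespaces-blank | .github_materials/data_sentiment.py | sentiment
-- ===== SOURCE A (Python) =====
-- def sentiment(num):
--     pos = 0
--     neg = 0
--     for i in num:
--         if i == 1:
--             pos += 1
--         elif i == 0:
--             neg += 1
--     return pos, neg
-- ===== SOURCE B (Python) =====
-- def sentiment(num):
--     # Divide-and-conquer: recursively split the index range in half and
--     # combine the (pos, neg) counts of the two halves.
--     def go(lo, hi):
--         n = hi - lo
--         if n == 0:
--             return (0, 0)
--         if n == 1:
--             x = num[lo]
--             if x == 1:
--                 return (1, 0)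
--             if x == 0:
--                 return (0, 1)
--             return (0, 0)
--         mid = (lo + hi) // 2
--         p1, n1 = go(lo, mid)
--         p2, n2 = go(mid, hi)
--         return (p1 + p2, n1 + n2)
--     return go(0, len(num))
-- ===== Notes on version B (the rewrite author's own statement) =====
-- stated objective: alternative
-- what changed: Replaced the single left-to-right accumulation loop by a divide-and-conquer recursion that halves the index range and adds the (pos, neg) counts of the two halves, correct because counting is associative-commutative over any partition of the list.
import Mathlib
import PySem

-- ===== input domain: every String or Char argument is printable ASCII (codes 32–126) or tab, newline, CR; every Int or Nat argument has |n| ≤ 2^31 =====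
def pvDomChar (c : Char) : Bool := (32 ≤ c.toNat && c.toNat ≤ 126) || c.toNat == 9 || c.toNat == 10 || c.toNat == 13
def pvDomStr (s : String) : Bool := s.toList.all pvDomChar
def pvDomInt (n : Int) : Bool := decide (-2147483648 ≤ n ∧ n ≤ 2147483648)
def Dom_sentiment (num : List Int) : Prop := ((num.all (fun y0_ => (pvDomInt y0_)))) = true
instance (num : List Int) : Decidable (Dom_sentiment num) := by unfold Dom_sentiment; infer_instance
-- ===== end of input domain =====

-- B replaces A's single accumulation loop by a divide-and-conquer recursion over index ranges (alternative decomposition, same cost).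

-- ===== PORT A =====
def sentiment (num : List Int) : Int × Int :=
  let st := num.foldl (fun (acc : Int × Int) i =>
    if i == 1 then (acc.1 + 1, acc.2)
    else if i == 0 then (acc.1, acc.2 + 1)
    else acc) (0, 0)
  (st.1, st.2)

-- ===== PORT B =====
-- helper `go(lo, hi)` of Source B; num[lo] is in range whenever lo < num.length (always the case as called)
def sentimentGo (num : List Int) (lo hi : Nat) : Int × Int :=
  if hi - lo = 0 then (0, 0)
  else if hi - lo = 1 then
    let x := num.getD lo 0
    if x = 1 then (1, 0)
    else if x = 0 then (0, 1)
    else (0, 0)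
  else
    ((sentimentGo num lo ((lo + hi) / 2)).1 + (sentimentGo num ((lo + hi) / 2) hi).1,
     (sentimentGo num lo ((lo + hi) / 2)).2 + (sentimentGo num ((lo + hi) / 2) hi).2)
termination_by hi - lo
decreasing_by all_goals omega

def sentiment_alt (num : List Int) : Int × Int :=
  sentimentGo num 0 num.length

-- ===== PRECONDITION & SPEC =====
def Spec_sentiment (num : List Int) (out : Int × Int) : Prop := out = sentiment_alt num
instance (num : List Int) (out : Int × Int) : Decidable (Spec_sentiment num out) := by unfold Spec_sentiment; infer_instance

-- ===== CLAIM (what is proved, stated in full; the proofs are below) =====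
def Claim_equal_sentiment : Prop := ∀ (num : List Int), Dom_sentiment num → Spec_sentiment num (sentiment num)

-- ===== LEMMAS AND PROOFS =====

-- linear reference counter over the interval [lo, lo+n)
def cnt (num : List Int) (lo n : Nat) : Int × Int :=
  match n with
  | 0 => (0, 0)
  | n + 1 =>
    let x := num.getD lo 0
    let r := cnt num (lo + 1) n
    (((if x = 1 then 1 else 0) : Int) + r.1, ((if x = 0 then 1 else 0) : Int) + r.2)

lemma cnt_split (num : List Int) (lo m n : Nat) :
    cnt num lo (m + n) = ((cnt num lo m).1 + (cnt num (lo + m) n).1,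
                          (cnt num lo m).2 + (cnt num (lo + m) n).2) := by
  induction m generalizing lo with
  | zero => simp [cnt]
  | succ m ih =>
    have : m + 1 + n = (m + n) + 1 := by omega
    rw [this]
    simp only [cnt, ih (lo + 1)]
    have : lo + 1 + m = lo + (m + 1) := by omega
    rw [this]
    ring_nf

lemma sentimentGo_eq_cnt (num : List Int) (lo hi : Nat) (h : lo ≤ hi) :
    sentimentGo num lo hi = cnt num lo (hi - lo) := by
  by_cases h0 : hi - lo = 0
  · rw [sentimentGo, if_pos h0, h0]; rfl
  · by_cases h1 : hi - lo = 1
    · rw [sentimentGo, if_neg h0, if_pos h1, h1]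
      simp only [cnt]
      split_ifs <;> simp_all
    · rw [sentimentGo, if_neg h0, if_neg h1]
      have hm1 : lo ≤ (lo + hi) / 2 := by omega
      have hm2 : (lo + hi) / 2 ≤ hi := by omega
      rw [sentimentGo_eq_cnt num lo ((lo + hi) / 2) hm1,
          sentimentGo_eq_cnt num ((lo + hi) / 2) hi hm2]
      have hsum : hi - lo = ((lo + hi) / 2 - lo) + (hi - (lo + hi) / 2) := by omega
      rw [hsum, cnt_split]
      have : lo + ((lo + hi) / 2 - lo) = (lo + hi) / 2 := by omega
      rw [this]
termination_by hi - lo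
decreasing_by all_goals omega

-- A's fold from an arbitrary state, against cnt over the whole list
lemma sentiment_fold (num : List Int) (p q : Int) :
    num.foldl (fun (acc : Int × Int) i =>
      if i = 1 then (acc.1 + 1, acc.2)
      else if i = 0 then (acc.1, acc.2 + 1)
      else acc) (p, q)
    = (p + (cnt num 0 num.length).1, q + (cnt num 0 num.length).2) := by
  induction num generalizing p q with
  | nil => simp [cnt]
  | cons x xs ih =>
    have hshift : ∀ n lo, cnt (x :: xs) (lo + 1) n = cnt xs lo n := by
      intro n
      induction n with
      | zero => intro lo; rfl
      | succ n ihn =>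
        intro lo
        simp only [cnt, ihn (lo + 1)]
        rfl
    simp only [List.foldl_cons, List.length_cons]
    have hc : cnt (x :: xs) 0 (xs.length + 1)
        = (((if x = 1 then 1 else 0) : Int) + (cnt xs 0 xs.length).1,
           ((if x = 0 then 1 else 0) : Int) + (cnt xs 0 xs.length).2) := by
      simp only [cnt, hshift]
      rfl
    rw [hc]
    by_cases h1 : x = 1
    · rw [if_pos h1, ih]
      simp [h1]; ring_nf
    · by_cases h0 : x = 0
      · rw [if_neg h1, if_pos h0, ih]
        simp [h0]; ring_nf
      · rw [if_neg h1, if_neg h0, ih]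
        simp [h0, h1]

-- ===== VERDICT (by name: the statement is the Claim_ definition above) =====
theorem sentiment_spec : Claim_equal_sentiment := by
  intro num _
  unfold Spec_sentiment sentiment sentiment_alt
  simp only [beq_iff_eq]
  rw [sentimentGo_eq_cnt num 0 num.length (Nat.zero_le _)]
  simp only [Nat.sub_zero]
  rw [sentiment_fold]
  simp
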